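-- pv_equiv track=rewrite | github.com/pcribierdelande/AoC2024 | Day09/day09.py | create_dic_empty_spaces
-- ===== SOURCE A (Python) =====
-- def create_dic_empty_spaces(
--     disk_files: dict[int, int], free_spaces: list[int]
-- ) -> dict[int:int]:
--     dic_empty_space = {}
--     current = 0
--     for idx, (file, free) in enumerate(zip(disk_files.values(), free_spaces)):
--         current += file
--         dic_empty_space[idx] = current
--         current += free
--     return dic_empty_space
-- ===== SOURCE B (Python) =====
-- def create_dic_empty_spaces(disk_files, free_spaces):
--     files = list(disk_files.values())
--     n = min(len(files), len(free_spaces))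
--     cum_files = []  # inclusive prefix sums of the first n file sizes
--     s = 0
--     for f in files[:n]:
--         s += f
--         cum_files.append(s)
--     frees = free_spaces[:n]
--     cum_free = [0]  # exclusive prefix sums of the first n free sizes
--     s = 0
--     for g in frees[:-1]:
--         s += g
--         cum_free.append(s)
--     return {i: cf + cg for i, (cf, cg) in enumerate(zip(cum_files, cum_free))}
-- ===== Notes on version B (the rewrite author's own statement) =====
-- stated objective: alternative
-- what changed: Replaces A's single interleaved loop threading one running accumulator through files and frees with a table-based decomposition: build an inclusive prefix-sum table of the file sizes and an exclusive prefix-sum table of the free sizes (both truncated to the shorter length), then combine them pointwise by index.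
import Mathlib
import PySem

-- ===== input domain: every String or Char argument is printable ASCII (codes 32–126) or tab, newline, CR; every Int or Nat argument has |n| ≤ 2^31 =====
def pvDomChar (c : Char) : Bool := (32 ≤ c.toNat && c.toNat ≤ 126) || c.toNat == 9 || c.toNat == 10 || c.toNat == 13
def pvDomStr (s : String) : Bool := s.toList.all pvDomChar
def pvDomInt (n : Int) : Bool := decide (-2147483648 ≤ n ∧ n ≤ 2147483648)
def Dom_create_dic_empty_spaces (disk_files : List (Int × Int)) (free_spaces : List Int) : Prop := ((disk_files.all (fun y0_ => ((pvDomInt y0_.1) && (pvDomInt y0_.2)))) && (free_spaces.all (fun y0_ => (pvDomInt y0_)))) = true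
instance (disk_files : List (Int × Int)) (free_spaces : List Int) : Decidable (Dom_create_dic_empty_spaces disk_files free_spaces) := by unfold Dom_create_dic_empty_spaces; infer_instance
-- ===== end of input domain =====

-- B replaces A's single accumulator loop by two prefix-sum tables combined pointwise (alternative decomposition, same cost).

-- ===== PORT A =====
-- the loop 'for idx, (file, free) in enumerate(zip(...))' with state (current, idx)
def loopA : List (Int × Int) → Int → Int → List (Int × Int)
  | [], _, _ => []
  | (file, free) :: rest, idx, current =>
      (idx, current + file) :: loopA rest (idx + 1) (current + file + free)

def create_dic_empty_spaces (disk_files : List (Int × Int)) (free_spaces : List Int) : List (Int × Int) :=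
  loopA (((PySem.Dict.ofList disk_files).values).zip free_spaces) 0 0

-- ===== PORT B =====
-- inclusive running prefix sums ('s += x; acc.append(s)')
def cumIncl : Int → List Int → List Int
  | _, [] => []
  | s, x :: xs => (s + x) :: cumIncl (s + x) xs

def create_dic_empty_spaces_alt (disk_files : List (Int × Int)) (free_spaces : List Int) : List (Int × Int) :=
  let files := (PySem.Dict.ofList disk_files).values
  let n := min files.length free_spaces.length
  let cumFiles := cumIncl 0 (files.take n)
  let frees := free_spaces.take n
  let cumFree := 0 :: cumIncl 0 (frees.take (frees.length - 1))
  PySem.List.enumerate (List.zipWith (· + ·) cumFiles cumFree) 0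

-- ===== PRECONDITION & SPEC =====
def Spec_create_dic_empty_spaces (disk_files : List (Int × Int)) (free_spaces : List Int) (out : List (Int × Int)) : Prop := out = create_dic_empty_spaces_alt disk_files free_spaces
instance (disk_files : List (Int × Int)) (free_spaces : List Int) (out : List (Int × Int)) : Decidable (Spec_create_dic_empty_spaces disk_files free_spaces out) := by unfold Spec_create_dic_empty_spaces; infer_instance

-- ===== CLAIM (what is proved, stated in full; the proofs are below) =====
def Claim_equal_create_dic_empty_spaces : Prop := ∀ (disk_files : List (Int × Int)) (free_spaces : List Int), Dom_create_dic_empty_spaces disk_files free_spaces → Spec_create_dic_empty_spaces disk_files free_spaces (create_dic_empty_spaces disk_files free_spaces)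

-- ===== LEMMAS AND PROOFS =====


theorem cumIncl_shift (xs : List Int) : ∀ (s t : Int), cumIncl (s + t) xs = (cumIncl t xs).map (s + ·) := by
  induction xs with
  | nil => intro s t; simp [cumIncl]
  | cons x xs ih =>
      intro s t
      simp only [cumIncl, List.map_cons]
      rw [show s + t + x = s + (t + x) by ring, ih s (t + x)]

theorem cumIncl_base (xs : List Int) (s : Int) : cumIncl s xs = (cumIncl 0 xs).map (s + ·) := by
  simpa using cumIncl_shift xs s 0

theorem loopA_shift (l : List (Int × Int)) : ∀ (idx cur : Int),
    loopA l idx cur = (loopA l 0 0).map (fun p => (idx + p.1, cur + p.2)) := by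
  induction l with
  | nil => intro idx cur; simp [loopA]
  | cons z l ih =>
      intro idx cur
      obtain ⟨file, free⟩ := z
      simp only [loopA, List.map_cons]
      congr 1
      · simp
      · rw [ih (idx + 1) (cur + file + free), ih (0 + 1) (0 + file + free), List.map_map]
        apply List.map_congr_left
        intro p _
        simp only [Function.comp, Prod.mk.injEq]
        constructor <;> ring

theorem enum_shift {α : Type} (xs : List α) : ∀ (s : Int),
    PySem.List.enumerate xs s = (PySem.List.enumerate xs 0).map (fun p => (s + p.1, p.2)) := by
  induction xs with
  | nil => intro s; simp [PySem.List.enumerate_nil]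
  | cons x xs ih =>
      intro s
      rw [PySem.List.enumerate_cons, PySem.List.enumerate_cons, ih (s + 1), ih (0 + 1),
        List.map_cons, List.map_map]
      congr 1
      · simp
      · apply List.map_congr_left
        intro p _
        simp only [Function.comp, Prod.mk.injEq]
        exact ⟨by ring, trivial⟩

theorem enum_map {α β : Type} (h : α → β) (xs : List α) : ∀ (s : Int),
    PySem.List.enumerate (xs.map h) s = (PySem.List.enumerate xs s).map (fun p => (p.1, h p.2)) := by
  induction xs with
  | nil => intro s; simp [PySem.List.enumerate_nil]
  | cons x xs ih =>
      intro s
      rw [List.map_cons, PySem.List.enumerate_cons, PySem.List.enumerate_cons, ih (s + 1),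
        List.map_cons]

theorem zip_add_shift (f g : Int) (as : List Int) : ∀ (bs : List Int),
    List.zipWith (· + ·) (as.map (f + ·)) (bs.map (g + ·))
      = (List.zipWith (· + ·) as bs).map ((f + g) + ·) := by
  induction as with
  | nil => intro bs; simp
  | cons a as ih =>
      intro bs
      cases bs with
      | nil => simp
      | cons b bs =>
          simp only [List.map_cons, List.zipWith_cons_cons, ih bs]
          congr 1
          ring


theorem Bstep (f g : Int) (X Y : List Int) :
    PySem.List.enumerate (List.zipWith (· + ·) (cumIncl 0 (f :: X)) (0 :: cumIncl 0 (g :: Y))) 0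
      = (0, f) :: (PySem.List.enumerate (List.zipWith (· + ·) (cumIncl 0 X) (0 :: cumIncl 0 Y)) 0).map
          (fun p => (1 + p.1, (f + g) + p.2)) := by
  have h1 : cumIncl 0 (f :: X) = f :: (cumIncl 0 X).map (f + ·) := by
    simp only [cumIncl, zero_add]
    exact congrArg _ (cumIncl_base X f)
  have h2 : cumIncl 0 (g :: Y) = g :: (cumIncl 0 Y).map (g + ·) := by
    simp only [cumIncl, zero_add]
    exact congrArg _ (cumIncl_base Y g)
  have h3 : (0 : Int) :: g :: (cumIncl 0 Y).map (g + ·) = 0 :: ((0 :: cumIncl 0 Y).map (g + ·)) := by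
    simp
  rw [h1, h2, h3, List.zipWith_cons_cons, zip_add_shift, PySem.List.enumerate_cons,
    enum_shift _ (0 + 1), enum_map, List.map_map]
  congr 1
  simp

theorem main_core (fs : List Int) : ∀ (gs : List Int),
    loopA (fs.zip gs) 0 0 =
      PySem.List.enumerate
        (List.zipWith (· + ·)
          (cumIncl 0 (fs.take (min fs.length gs.length)))
          (0 :: cumIncl 0 ((gs.take (min fs.length gs.length)).take
              ((gs.take (min fs.length gs.length)).length - 1)))) 0 := by
  induction fs with
  | nil => intro gs; simp [loopA, cumIncl, PySem.List.enumerate_nil]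
  | cons f F ihF =>
      intro gs
      cases gs with
      | nil => simp [loopA, cumIncl, PySem.List.enumerate_nil]
      | cons g G =>
          cases F with
          | nil =>
              cases G with
              | nil =>
                  simp [loopA, cumIncl, PySem.List.enumerate_cons, PySem.List.enumerate_nil]
              | cons g2 G2 =>
                  simp [loopA, cumIncl, PySem.List.enumerate_cons, PySem.List.enumerate_nil]
          | cons f2 F2 =>
              cases G with
              | nil =>
                  simp [loopA, cumIncl, PySem.List.enumerate_cons, PySem.List.enumerate_nil]
              | cons g2 G2 =>
                  have hk : min (min F2.length G2.length) G2.length = min F2.length G2.length := by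
                    omega
                  simp only [List.zip_cons_cons]
                  rw [show loopA ((f, g) :: (f2, g2) :: F2.zip G2) 0 0
                        = (0, 0 + f) :: loopA ((f2, g2) :: F2.zip G2) (0 + 1) (0 + f + g)
                      from rfl]
                  have ih2 := ihF (g2 :: G2)
                  simp only [List.zip_cons_cons] at ih2
                  rw [loopA_shift _ (0 + 1) (0 + f + g), ih2]
                  simp only [List.length_cons, Nat.succ_min_succ, List.take_succ_cons,
                    List.length_take, hk, Nat.add_sub_cancel, zero_add]
                  rw [Bstep]

-- ===== VERDICT (by name: the statement is the Claim_ definition above) =====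
theorem create_dic_empty_spaces_spec : Claim_equal_create_dic_empty_spaces := by
  intro disk_files free_spaces _
  unfold Spec_create_dic_empty_spaces create_dic_empty_spaces create_dic_empty_spaces_alt
  exact main_core _ _
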